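-- pv_equiv track=rewrite | github.com/posl/comment_recommendation | script/mod_gen/1_time/en/234_C/1.py | getNthSmallestNumber
-- ===== SOURCE A (Python) =====
-- def getNthSmallestNumber(k):
--     if k == 1:
--         return "2"
--     if k == 2:
--         return "20"
--     if k == 3:
--         return "22"
--     k -= 3
--     digits = 1
--     while k > 2 * (2 ** digits):
--         k -= 2 * (2 ** digits)
--         digits += 1
--     if k % 2 == 0:
--         return getNthSmallestNumber(k // 2) + "0" * digits
--     else:
--         return getNthSmallestNumber(k // 2 + 1) + "2" + "0" * (digits - 1)
-- ===== SOURCE B (Python) =====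
-- def getNthSmallestNumber(k):
--     acc = ""
--     while k > 3:
--         d = k.bit_length() - 2
--         r = k + 1 - 2 ** (d + 1)
--         if r % 2 == 0:
--             acc = "0" * d + acc
--             k = r // 2
--         else:
--             acc = "2" + "0" * (d - 1) + acc
--             k = r // 2 + 1
--     return ("2", "20", "22")[k - 1] + acc
-- ===== Notes on version B (the rewrite author's own statement) =====
-- stated objective: alternative
-- what changed: Replaced A's single-self-call recursion and its inner subtract-while loop by an iterative prepend-accumulator loop that computes the digit count directly from k.bit_length() arithmetic, so the inner loop disappears.
-- outside the precondition, e.g. on getNthSmallestNumber(0): A raises RecursionError, B returns '22'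
import Mathlib
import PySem

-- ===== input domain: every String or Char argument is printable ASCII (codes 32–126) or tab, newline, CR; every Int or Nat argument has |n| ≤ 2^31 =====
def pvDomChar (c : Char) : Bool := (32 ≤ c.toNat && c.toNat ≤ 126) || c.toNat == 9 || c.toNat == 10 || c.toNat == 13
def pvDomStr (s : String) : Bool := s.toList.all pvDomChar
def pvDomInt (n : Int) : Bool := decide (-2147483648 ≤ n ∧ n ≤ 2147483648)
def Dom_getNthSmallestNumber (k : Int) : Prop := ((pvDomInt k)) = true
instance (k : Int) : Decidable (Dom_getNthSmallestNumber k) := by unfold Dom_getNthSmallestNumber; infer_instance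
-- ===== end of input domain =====

-- B replaces A's recursion-plus-subtraction-loop by an iterative prepend-accumulator loop whose
-- digit count comes from bit_length arithmetic instead of A's inner while loop (objective: alternative).

-- ===== PORT A =====
-- A's inner `while k > 2 * (2 ** digits)` loop; returns the final (k, digits).
-- `fuel` only makes the recursion structural; it never runs out here: the loop subtracts at
-- least 4 from k each iteration, and the caller passes fuel = k.toNat.
def aInner (fuel : Nat) (k : Int) (digits : Int) : Int × Int :=
  match fuel with
  | 0 => (k, digits)
  | f + 1 =>
    if 2 * 2 ^ digits.toNat < k then aInner f (k - 2 * 2 ^ digits.toNat) (digits + 1)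
    else (k, digits)

-- literal port of A's recursion; `fuel` only makes it structural (each self-call is on a
-- strictly smaller positive argument, so fuel = k.toNat suffices; for k ≤ 0, where the Python
-- recurses forever — RecursionError — fuel runs out and "" is returned; Pre_ excludes that).
-- "0" * digits is ported by hand as String.ofList (List.replicate …) — exact, one ASCII char.
def aGo (fuel : Nat) (k : Int) : String :=
  match fuel with
  | 0 => ""
  | f + 1 =>
    if k = 1 then "2"
    else if k = 2 then "20"
    else if k = 3 then "22"
    else
      let p := aInner (k - 3).toNat (k - 3) 1
      if PySem.Int.mod p.1 2 = 0 then
        aGo f (PySem.Int.floordiv p.1 2) ++ String.ofList (List.replicate p.2.toNat '0')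
      else
        aGo f (PySem.Int.floordiv p.1 2 + 1) ++
          ("2" ++ String.ofList (List.replicate (p.2 - 1).toNat '0'))

def getNthSmallestNumber (k : Int) : String := aGo k.toNat k

-- ===== PORT B =====
-- B's `while k > 3` loop with the string prepend-accumulator; k.bit_length() is ported as
-- PySem.Int.bitLength (Python-exact). `fuel` only makes the loop structural (k strictly
-- decreases each iteration; for k ≤ 0 Python B's loop exits at once, but there fuel ≥ 1
-- still holds only for k ≤ 0 via the caller's `max 1`, see getNthSmallestNumber_alt).
def bGo (fuel : Nat) (k : Int) (acc : String) : String :=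
  match fuel with
  | 0 => ""
  | f + 1 =>
    if 3 < k then
      let d : Nat := PySem.Int.bitLength k - 2
      let r : Int := k + 1 - 2 ^ (d + 1)
      if PySem.Int.mod r 2 = 0 then
        bGo f (PySem.Int.floordiv r 2) (String.ofList (List.replicate d '0') ++ acc)
      else
        bGo f (PySem.Int.floordiv r 2 + 1)
          ("2" ++ String.ofList (List.replicate (d - 1) '0') ++ acc)
    else
      -- ("2", "20", "22")[k - 1] : Python tuple indexing (negative index from the end,
      -- IndexError → none, impossible under Pre_ since the loop keeps k ∈ {1,2,3})
      match PySem.List.pyGet? ["2", "20", "22"] (k - 1) with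
      | some s => s ++ acc
      | none => ""

def getNthSmallestNumber_alt (k : Int) : String := bGo (max 1 k.toNat) k ""

-- ===== PRECONDITION & SPEC =====
-- Pre_ excludes k ≤ 0, where the Python A recurses forever (RecursionError).
def Pre_getNthSmallestNumber (k : Int) : Prop := 1 ≤ k
instance (k : Int) : Decidable (Pre_getNthSmallestNumber k) := by unfold Pre_getNthSmallestNumber; infer_instance
def pvWitness_getNthSmallestNumber : Int := 1
def Spec_getNthSmallestNumber (k : Int) (out : String) : Prop := out = getNthSmallestNumber_alt k
instance (k : Int) (out : String) : Decidable (Spec_getNthSmallestNumber k out) := by unfold Spec_getNthSmallestNumber; infer_instance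

-- ===== CLAIM (what is proved, stated in full; the proofs are below) =====
def Claim_equal_getNthSmallestNumber : Prop := ∀ (k : Int), Dom_getNthSmallestNumber k → Pre_getNthSmallestNumber k → Spec_getNthSmallestNumber k (getNthSmallestNumber k)

-- ===== LEMMAS AND PROOFS =====

-- characterization of A's inner loop: it finds the unique J ≥ digits with the residual in (0, 2^(J+1)]
theorem aInner_char : ∀ (fuel : Nat) (m j : Int), 1 ≤ m → 0 ≤ j → m.toNat ≤ fuel →
    ∃ J : Nat, j.toNat ≤ J ∧
      aInner fuel m j = (m + 2 ^ (j.toNat + 1) - 2 ^ (J + 1), (J : Int)) ∧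
      1 ≤ m + 2 ^ (j.toNat + 1) - 2 ^ (J + 1) ∧
      m + 2 ^ (j.toNat + 1) - 2 ^ (J + 1) ≤ 2 ^ (J + 1) := by
  intro fuel
  induction fuel with
  | zero => intro m j hm hj hf; omega
  | succ f ih =>
    intro m j hm hj hf
    rw [aInner]
    split_ifs with hc
    · have h1 : (1:Int) ≤ 2 ^ j.toNat := one_le_pow₀ (by norm_num)
      obtain ⟨J, hJ, heq, hlo, hhi⟩ :=
        ih (m - 2 * 2 ^ j.toNat) (j + 1) (by omega) (by omega) (by omega)
      have hjj : (j + 1).toNat = j.toNat + 1 := by omega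
      rw [hjj] at heq hlo hhi
      have hpow : (2:Int) ^ (j.toNat + 1 + 1) = 2 * 2 ^ (j.toNat + 1) := by ring
      have hpow' : (2:Int) ^ (j.toNat + 1) = 2 * 2 ^ j.toNat := by ring
      refine ⟨J, by omega, ?_, by omega, by omega⟩
      rw [heq]
      congr 1
      omega
    · refine ⟨j.toNat, le_refl _, ?_, by omega, ?_⟩
      · have : ((j.toNat : Int)) = j := Int.toNat_of_nonneg hj
        simp [this]
      · have : (2:Int) ^ (j.toNat + 1) = 2 * 2 ^ j.toNat := by ring
        omega

-- the bit_length arithmetic in B names exactly the J that A's inner loop finds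
theorem bitLength_eq_of_bounds (k : Int) (J : Nat)
    (h1 : 2 ^ (J + 1) ≤ k) (h2 : k < 2 ^ (J + 2)) : PySem.Int.bitLength k = J + 2 := by
  have hp : (1:Int) ≤ 2 ^ (J + 1) := one_le_pow₀ (by norm_num)
  have hk : k ≠ 0 := by omega
  have ha := PySem.Int.lt_two_pow_bitLength k
  have hb := PySem.Int.two_pow_bitLength_le k hk
  have hcast : (k.natAbs : Int) = k := Int.natAbs_of_nonneg (by omega)
  have hn1 : 2 ^ (J + 1) ≤ k.natAbs := by exact_mod_cast hcast ▸ h1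
  have hn2 : k.natAbs < 2 ^ (J + 2) := by exact_mod_cast hcast ▸ h2
  rcases lt_trichotomy (PySem.Int.bitLength k) (J + 2) with h | h | h
  · have : (2:Nat) ^ PySem.Int.bitLength k ≤ 2 ^ (J + 1) :=
      Nat.pow_le_pow_right (by norm_num) (by omega)
    omega
  · exact h
  · have : (2:Nat) ^ (J + 2) ≤ 2 ^ (PySem.Int.bitLength k - 1) :=
      Nat.pow_le_pow_right (by norm_num) (by omega)
    omega

-- loop invariant: B's prepend-accumulator loop computes A's recursion result in front of acc
theorem bGo_eq_aGo : ∀ (fuel : Nat) (k : Int) (acc : String), 1 ≤ k → k.toNat ≤ fuel →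
    bGo fuel k acc = aGo fuel k ++ acc := by
  intro fuel
  induction fuel with
  | zero => intro k acc hk hf; omega
  | succ f ih =>
    intro k acc hk hf
    by_cases hbig : 3 < k
    · rw [bGo, aGo]
      simp only [if_pos hbig, if_neg (by omega : ¬ k = 1), if_neg (by omega : ¬ k = 2),
        if_neg (by omega : ¬ k = 3)]
      obtain ⟨J, hJ, heq, hlo, hhi⟩ :=
        aInner_char (k - 3).toNat (k - 3) 1 (by omega) (by omega) (le_refl _)
      have h14 : ((1:Int)).toNat = 1 := rfl
      rw [h14] at heq hlo hhi
      have hJ1 : 1 ≤ J := by simpa using hJ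
      have h4 : (4:Int) ≤ 2 ^ (J + 1) := by
        calc (4:Int) = 2 ^ 2 := by norm_num
        _ ≤ 2 ^ (J + 1) := pow_le_pow_right₀ (by norm_num) (by omega)
      have hr : k - 3 + 2 ^ (1 + 1) - 2 ^ (J + 1) = k + 1 - 2 ^ (J + 1) := by
        have : (2:Int) ^ (1 + 1) = 4 := by norm_num
        omega
      rw [hr] at heq hlo hhi
      set r : Int := k + 1 - 2 ^ (J + 1) with hrdef
      have hbl : PySem.Int.bitLength k = J + 2 :=
        bitLength_eq_of_bounds k J (by omega) (by have h2 : (2:Int)^(J+2) = 2*2^(J+1) := (by ring); omega)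
      have hd : PySem.Int.bitLength k - 2 = J := by omega
      rw [heq]
      simp only [hd, hrdef]
      have hmod : PySem.Int.mod (k + 1 - 2 ^ (J + 1)) 2 = (k + 1 - 2 ^ (J + 1)) % 2 :=
        PySem.Int.mod_eq_emod_of_pos (by norm_num)
      have hdiv : PySem.Int.floordiv (k + 1 - 2 ^ (J + 1)) 2 = (k + 1 - 2 ^ (J + 1)) / 2 :=
        PySem.Int.floordiv_eq_ediv_of_pos (by norm_num)
      have hJt : ((J : Int)).toNat = J := by omega
      have hJt1 : ((J : Int) - 1).toNat = J - 1 := by omega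
      by_cases he : PySem.Int.mod (k + 1 - 2 ^ (J + 1)) 2 = 0
      · simp only [if_pos he]
        rw [hJt, ih _ _ (by rw [hdiv]; rw [hmod] at he; omega) (by rw [hdiv]; omega),
          String.append_assoc]
      · simp only [if_neg he]
        rw [hJt1, ih _ _ (by rw [hdiv]; omega) (by rw [hdiv]; omega)]
        simp [String.append_assoc]
    · have : k = 1 ∨ k = 2 ∨ k = 3 := by omega
      rcases this with h | h | h <;> subst h <;> rw [bGo, aGo] <;>
        norm_num [PySem.List.pyGet?, PySem.List.pyIdx?] <;> try rfl

-- ===== VERDICT (by name: the statement is the Claim_ definition above) =====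
theorem getNthSmallestNumber_spec : Claim_equal_getNthSmallestNumber := by
  intro k _ hpre
  show getNthSmallestNumber k = getNthSmallestNumber_alt k
  have hk : 1 ≤ k := hpre
  have hmax : max 1 k.toNat = k.toNat := by omega
  rw [getNthSmallestNumber, getNthSmallestNumber_alt, hmax,
    bGo_eq_aGo k.toNat k "" hk (le_refl _)]
  simp
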